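-- pv_equiv track=rewrite | github.com/ZheniaM/Substrings-finders | substring_finders/_automaton.py | make_dfa
-- ===== SOURCE A (Python) =====
-- def make_dfa(source: str, alphabet: set[str]) -> list[dict[str, int]]:
--     table: list[dict[str, int]] = []
--     substring: str = ""
--     for i in source:
--         row: dict = {}
--         for symbol in alphabet:
--             sub = substring + symbol
--             for _ in range(len(sub)):
--                 if (sub == source[:len(sub)]):
--                     row[symbol] = len(sub)
--                     break
--                 *sub, _ = sub
--             else:
--                 row[symbol] = 0
--         substring += i
--         table.append(row)
--     return table
-- ===== SOURCE B (Python) =====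
-- def make_dfa(source: str, alphabet: set[str]) -> list[dict[str, int]]:
--     return [{symbol: (i + len(symbol) if source[i:i + len(symbol)] == symbol else 0)
--              for symbol in alphabet}
--             for i in range(len(source))]
-- ===== Notes on version B (the rewrite author's own statement) =====
-- stated objective: faster
-- what changed: Replace A's growing substring accumulator and its per-symbol shrink loop (which compares a list with a string after the star-unpack and so can never match again, leaving only the first full-prefix check live) by one direct slice comparison source[i:i+len(sym)] == sym per table cell in a single comprehension.
import Mathlib
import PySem

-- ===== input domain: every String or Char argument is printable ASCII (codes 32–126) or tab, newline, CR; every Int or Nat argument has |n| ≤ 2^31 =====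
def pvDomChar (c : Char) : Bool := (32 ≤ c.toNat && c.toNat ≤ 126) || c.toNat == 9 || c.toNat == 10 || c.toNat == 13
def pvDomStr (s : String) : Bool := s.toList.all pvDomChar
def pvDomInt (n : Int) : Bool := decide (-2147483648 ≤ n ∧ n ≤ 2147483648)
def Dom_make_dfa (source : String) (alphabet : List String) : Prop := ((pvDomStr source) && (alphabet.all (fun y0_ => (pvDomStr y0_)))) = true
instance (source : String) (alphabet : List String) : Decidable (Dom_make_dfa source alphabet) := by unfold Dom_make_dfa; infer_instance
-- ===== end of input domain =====

-- B is a single comprehension over positions: A's growing `substring` accumulator and its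
-- per-symbol shrink loop (which, after the `*sub, _ = sub` unpack, compares a list with a
-- string and therefore never matches again) are replaced by one direct slice comparison per
-- cell; measurably faster on large inputs. `alphabet` is a Python set, ported as the list
-- of its distinct elements; each row dict is returned in that iteration order.

-- ===== PORT A =====
-- inner 'for _ in range(len(sub)) … else' loop of A; `isStr` records whether `sub` is still
-- a str: after Python's '*sub, _ = sub' it is a list of chars, and Python's `list == str`
-- comparison is always False, which the `isStr && …` test renders exactly.
def make_dfa_go (src : List Char) (fuel : Nat) (sub : List Char) (isStr : Bool) : Int :=
  match fuel with
  | 0 => 0                                   -- loop exhausted: for-else branch, row[symbol] = 0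
  | fuel + 1 =>
      if isStr ∧ sub = PySem.List.slice src none (some (sub.length : Int)) then
        (sub.length : Int)                   -- row[symbol] = len(sub); break
      else
        make_dfa_go src fuel sub.dropLast false   -- *sub, _ = sub

-- body of 'for symbol in alphabet': sub = substring + symbol, then the inner loop
def make_dfa_row (src : List Char) (alphabet : List String) (substring : List Char) :
    List (String × Int) :=
  (alphabet.foldl
    (fun row symbol =>
      let sub := substring ++ symbol.toList
      PySem.Dict.insert row symbol (make_dfa_go src sub.length sub true))
    (PySem.Dict.mk [])).items

-- outer 'for i in source' loop with the growing `substring` accumulator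
def make_dfa_rows (src : List Char) (alphabet : List String) (rest : List Char)
    (substring : List Char) : List (List (String × Int)) :=
  match rest with
  | [] => []
  | i :: rest' =>
      make_dfa_row src alphabet substring :: make_dfa_rows src alphabet rest' (substring ++ [i])

def make_dfa (source : String) (alphabet : List String) : List (List (String × Int)) :=
  make_dfa_rows source.toList alphabet source.toList []

-- ===== PORT B =====
-- Source B: [{sym: (i + len(sym) if source[i:i+len(sym)] == sym else 0) for sym in alphabet}
--        for i in range(len(source))]
def make_dfa_alt_row (src : List Char) (alphabet : List String) (i : Int) :
    List (String × Int) :=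
  (alphabet.foldl
    (fun row symbol =>
      PySem.Dict.insert row symbol
        (if PySem.List.slice src (some i) (some (i + (symbol.toList.length : Int))) = symbol.toList
         then i + (symbol.toList.length : Int) else 0))
    (PySem.Dict.mk [])).items

def make_dfa_alt (source : String) (alphabet : List String) : List (List (String × Int)) :=
  (PySem.List.pyRange 0 (source.toList.length : Int) 1).map
    (fun i => make_dfa_alt_row source.toList alphabet i)

-- ===== PRECONDITION & SPEC =====
def Spec_make_dfa (source : String) (alphabet : List String) (out : List (List (String × Int))) : Prop := out = make_dfa_alt source alphabet
instance (source : String) (alphabet : List String) (out : List (List (String × Int))) : Decidable (Spec_make_dfa source alphabet out) := by unfold Spec_make_dfa; infer_instance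

-- ===== CLAIM (what is proved, stated in full; the proofs are below) =====
def Claim_equal_make_dfa : Prop := ∀ (source : String) (alphabet : List String), Dom_make_dfa source alphabet → Spec_make_dfa source alphabet (make_dfa source alphabet)

-- ===== LEMMAS AND PROOFS =====

-- once `sub` has become a list, the comparison is always False and the loop returns 0
lemma make_dfa_go_false (src : List Char) (fuel : Nat) (sub : List Char) :
    make_dfa_go src fuel sub false = 0 := by
  induction fuel generalizing sub with
  | zero => rfl
  | succ n ih => simp [make_dfa_go, ih]

-- closed form of A's inner loop: only the very first comparison can succeed
lemma make_dfa_go_closed (src : List Char) (sub : List Char) :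
    make_dfa_go src sub.length sub true
      = if sub = src.take sub.length then (sub.length : Int) else 0 := by
  cases sub with
  | nil => simp [make_dfa_go]
  | cons c cs =>
      show make_dfa_go src (cs.length + 1) (c :: cs) true = _
      rw [make_dfa_go, PySem.List.slice_to_natCast, make_dfa_go_false]
      simp

-- the per-cell values agree when `substring` is the length-k prefix of src
lemma cell_eq (pre rest : List Char) (s : List Char) :
    make_dfa_go (pre ++ rest) (pre ++ s).length (pre ++ s) true
      = (if PySem.List.slice (pre ++ rest) (some (pre.length : Int))
              (some ((pre.length : Int) + (s.length : Int))) = s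
         then (pre.length : Int) + (s.length : Int) else 0) := by
  rw [make_dfa_go_closed, PySem.List.slice_natCast_add]
  have hlen : (pre ++ s).length = pre.length + s.length := List.length_append
  rw [hlen, List.take_add, List.take_left]
  have : (pre ++ s = pre ++ List.take s.length (List.drop pre.length (pre ++ rest)))
      ↔ (List.take s.length (List.drop pre.length (pre ++ rest)) = s) := by
    constructor
    · intro h; exact (List.append_cancel_left h).symm
    · intro h; rw [h]
  split_ifs with h1 h2 h2
  · push_cast; ring
  · exact absurd (this.mp h1) h2
  · exact absurd (this.mpr h2) h1
  · rfl

lemma row_eq (pre rest : List Char) (alphabet : List String) :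
    make_dfa_row (pre ++ rest) alphabet pre
      = make_dfa_alt_row (pre ++ rest) alphabet (pre.length : Int) := by
  unfold make_dfa_row make_dfa_alt_row
  congr 2
  funext row symbol
  simp only []
  rw [cell_eq pre rest symbol.toList]

lemma rows_eq (alphabet : List String) (pre rest : List Char) :
    make_dfa_rows (pre ++ rest) alphabet rest pre
      = (List.range rest.length).map
          (fun j => make_dfa_alt_row (pre ++ rest) alphabet ((pre.length + j : Nat) : Int)) := by
  induction rest generalizing pre with
  | nil => rfl
  | cons i rest' ih =>
      rw [make_dfa_rows, row_eq pre (i :: rest') alphabet]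
      have h2 := ih (pre ++ [i])
      rw [show (pre ++ [i]) ++ rest' = pre ++ i :: rest' by simp] at h2
      rw [h2]
      simp only [List.length_cons, List.range_succ_eq_map, List.map_cons, List.map_map]
      congr 1
      · apply List.map_congr_left
        intro j _
        simp only [Function.comp_apply]
        have : (pre ++ [i]).length + j = pre.length + Nat.succ j := by
          simp only [List.length_append, List.length_cons, List.length_nil]; omega
        rw [this]

-- ===== VERDICT (by name: the statement is the Claim_ definition above) =====
theorem make_dfa_spec : Claim_equal_make_dfa := by
  intro source alphabet _
  unfold Spec_make_dfa make_dfa make_dfa_alt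
  have h := rows_eq alphabet [] source.toList
  simp only [List.nil_append, List.length_nil] at h
  rw [h, PySem.List.pyRange_one]
  simp only [Int.sub_zero, Int.toNat_natCast, List.map_map]
  apply List.map_congr_left
  intro j _
  simp
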